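-- pv_equiv track=rewrite | github.com/KafkaesqueWA/Spring2024 | Combinatorics/EX5.2.3.py | generate_walks_with_loops
-- ===== SOURCE A (Python) =====
-- def generate_walks_with_loops(graph, start_vertex, length):
--     def dfs(vertex, current_walk):
--         current_walk.append(vertex)
--         if len(current_walk) == length:
--             walks.append(current_walk.copy())
--             current_walk.pop()
--             return
--         for neighbor in graph[vertex]:
--             dfs(neighbor, current_walk)
--         current_walk.pop()
--
--     walks = []
--     dfs(start_vertex, [])
--     return walks
-- ===== SOURCE B (Python) =====
-- def generate_walks_with_loops(graph, start_vertex, length):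
--     if length < 1:
--         return []
--     walks = [[start_vertex]]
--     for _ in range(length - 1):
--         walks = [w + [n] for w in walks for n in graph[w[-1]]]
--     return walks
-- ===== Notes on version B (the rewrite author's own statement) =====
-- stated objective: simpler
-- what changed: Replaces the recursive DFS with a shared mutable walk and nonlocal accumulator by an iterative level-by-level expansion: start from [[start_vertex]] and, length-1 times, extend every walk by every neighbor of its last vertex (same lexicographic order).
import Mathlib
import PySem

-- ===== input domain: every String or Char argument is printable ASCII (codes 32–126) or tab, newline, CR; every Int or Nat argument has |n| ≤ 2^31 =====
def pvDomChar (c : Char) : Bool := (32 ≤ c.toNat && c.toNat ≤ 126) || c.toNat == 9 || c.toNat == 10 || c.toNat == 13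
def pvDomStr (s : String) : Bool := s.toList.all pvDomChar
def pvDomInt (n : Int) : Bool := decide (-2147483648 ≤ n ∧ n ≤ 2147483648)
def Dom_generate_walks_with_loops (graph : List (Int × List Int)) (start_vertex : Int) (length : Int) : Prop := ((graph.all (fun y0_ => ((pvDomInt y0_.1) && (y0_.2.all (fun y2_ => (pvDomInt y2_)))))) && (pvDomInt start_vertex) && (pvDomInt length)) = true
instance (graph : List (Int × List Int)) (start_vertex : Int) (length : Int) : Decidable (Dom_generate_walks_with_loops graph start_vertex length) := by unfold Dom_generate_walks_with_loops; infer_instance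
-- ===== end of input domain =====

-- B replaces A's recursive DFS over a shared mutable walk by an iterative level-by-level
-- expansion of the walk list (simpler decomposition, same order and cost).

-- ===== PORT A =====
-- A's inner dfs. Python's recursion depth is bounded by length - len(current_walk) wherever A
-- returns, so we carry that as a fuel argument (on Pre_ the fuel never runs out: for length ≤ 0
-- Pre_ admits only inputs where the length test never fires and the exploration dies out with
-- walks = [], which is what fuel 0 yields; for length ≥ 1 the fuel is exact).
-- graph[vertex] is a dict lookup; Pre_ excludes the KeyError inputs, so getD with [] is exact there.
def pvDfsA (graph : List (Int × List Int)) (length : Int) :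
    Nat → Int → List Int → List (List Int) → List (List Int)
  | fuel, vertex, current_walk, walks =>
    let cw := current_walk ++ [vertex]
    if ((cw.length : Int) = length) then
      walks ++ [cw]
    else
      match fuel with
      | 0 => walks
      | Nat.succ f =>
        (PySem.Dict.getD (PySem.Dict.mk graph) vertex []).foldl (fun ws n => pvDfsA graph length f n cw ws) walks

def generate_walks_with_loops (graph : List (Int × List Int)) (start_vertex : Int) (length : Int) : List (List Int) :=
  pvDfsA graph length length.toNat start_vertex [] []

-- ===== PORT B =====
-- one pass of B's list comprehension: extend every walk by every neighbor of its last vertex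
-- (w[-1] on the nonempty walks B builds; pyGetD's default is never consulted there)
def pvStep (graph : List (Int × List Int)) (walks : List (List Int)) : List (List Int) :=
  walks.flatMap (fun w => (PySem.Dict.getD (PySem.Dict.mk graph) (PySem.List.pyGetD w (-1) 0) []).map (fun n => w ++ [n]))

-- Source B: early return [] for length < 1, else run the expansion loop length-1 times on [[start]]
def generate_walks_with_loops_alt (graph : List (Int × List Int)) (start_vertex : Int) (length : Int) : List (List Int) :=
  if length < 1 then []
  else (pvStep graph)^[(length - 1).toNat] [[start_vertex]]

-- ===== PRECONDITION & SPEC =====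
-- closure helper: vertices reachable from the set init in at most the given number of steps
def pvClose (graph : List (Int × List Int)) (init : List Int) : Nat → List Int
  | 0 => init
  | k + 1 =>
    pvClose graph
      (init.foldl
        (fun acc v => (PySem.Dict.getD (PySem.Dict.mk graph) v []).foldl (fun a n => PySem.Set.add a n) acc)
        init)
      k

-- saturation fuel: the closure can gain at most one new vertex per neighbour-list entry
def pvFuel (graph : List (Int × List Int)) : Nat :=
  1 + (graph.map (fun p => p.2.length)).sum

-- Pre_ excludes exactly the inputs on which Python A raises instead of returning: KeyError when a
-- vertex A looks up (reachable within length-2 steps, or anywhere reachable when length ≤ 0, since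
-- then the length test never fires) has no adjacency entry, and RecursionError when length ≤ 0 and
-- a cycle is reachable from start_vertex; everywhere A returns, Pre_ holds.
def Pre_generate_walks_with_loops (graph : List (Int × List Int)) (start_vertex : Int) (length : Int) : Prop :=
  (length ≤ 0 ∧
    (∀ v ∈ pvClose graph [start_vertex] (pvFuel graph),
        v ∈ graph.map Prod.fst ∧
        v ∉ pvClose graph (PySem.Dict.getD (PySem.Dict.mk graph) v []) (pvFuel graph))) ∨
  length = 1 ∨
  (2 ≤ length ∧
    ∀ v ∈ pvClose graph [start_vertex] (min (length - 2).toNat (pvFuel graph)),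
      v ∈ graph.map Prod.fst)
instance (graph : List (Int × List Int)) (start_vertex : Int) (length : Int) : Decidable (Pre_generate_walks_with_loops graph start_vertex length) := by unfold Pre_generate_walks_with_loops; infer_instance

def pvWitness_generate_walks_with_loops : (List (Int × List Int)) × Int × Int := ([(0, [0, 1]), (1, [0])], 0, 3)

def Spec_generate_walks_with_loops (graph : List (Int × List Int)) (start_vertex : Int) (length : Int) (out : List (List Int)) : Prop := out = generate_walks_with_loops_alt graph start_vertex length
instance (graph : List (Int × List Int)) (start_vertex : Int) (length : Int) (out : List (List Int)) : Decidable (Spec_generate_walks_with_loops graph start_vertex length out) := by unfold Spec_generate_walks_with_loops; infer_instance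

-- ===== CLAIM =====
def Claim_equal_generate_walks_with_loops : Prop := ∀ (graph : List (Int × List Int)) (start_vertex : Int) (length : Int), Dom_generate_walks_with_loops graph start_vertex length → Pre_generate_walks_with_loops graph start_vertex length → Spec_generate_walks_with_loops graph start_vertex length (generate_walks_with_loops graph start_vertex length)

-- ===== LEMMAS AND PROOFS =====

theorem pvStep_append (g : List (Int × List Int)) (A B : List (List Int)) :
    pvStep g (A ++ B) = pvStep g A ++ pvStep g B := by
  simp [pvStep]

theorem pvStep_iterate_append (g : List (Int × List Int)) (k : Nat) (A B : List (List Int)) :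
    (pvStep g)^[k] (A ++ B) = (pvStep g)^[k] A ++ (pvStep g)^[k] B := by
  induction k generalizing A B with
  | zero => simp
  | succ k ih => simp [Function.iterate_succ_apply, pvStep_append, ih]

theorem pvStep_iterate_nil (g : List (Int × List Int)) (k : Nat) :
    (pvStep g)^[k] ([] : List (List Int)) = [] := by
  induction k with
  | zero => rfl
  | succ k ih => simp [Function.iterate_succ_apply, pvStep, ih]

theorem pvStep_singleton (g : List (Int × List Int)) (w : List Int) (v : Int) :
    pvStep g [w ++ [v]] = (PySem.Dict.getD (PySem.Dict.mk g) v []).map (fun n => (w ++ [v]) ++ [n]) := by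
  simp [pvStep, PySem.List.pyGetD_neg_one_append_singleton]

-- the DFS with enough fuel produces exactly the level expansion of its current walk, appended to the accumulator
theorem pvDfsA_eq (g : List (Int × List Int)) (length : Int) :
    ∀ (fuel : Nat) (vertex : Int) (walk : List Int) (walks : List (List Int)),
      ((walk.length : Int) + 1 ≤ length) → (length ≤ (walk.length : Int) + 1 + fuel) →
      pvDfsA g length fuel vertex walk walks
        = walks ++ (pvStep g)^[(length - ((walk.length : Int) + 1)).toNat] [walk ++ [vertex]] := by
  intro fuel
  induction fuel with
  | zero =>
    intro vertex walk walks h1 h2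
    have hlen : ((walk ++ [vertex]).length : Int) = length := by
      simp; omega
    rw [pvDfsA]
    simp only [hlen]
    have : (length - ((walk.length : Int) + 1)).toNat = 0 := by simp at hlen; omega
    simp [this]
  | succ f ih =>
    intro vertex walk walks h1 h2
    rw [pvDfsA]
    simp only [List.length_append, List.length_cons, List.length_nil]
    by_cases hl : ((walk.length : Int) + 1 = length)
    · have : ((walk.length + (0 + 1) : Nat) : Int) = length := by push_cast; omega
      simp only [this]
      have : (length - ((walk.length : Int) + 1)).toNat = 0 := by omega
      simp [this]
    · have hne : ¬ (((walk.length + (0 + 1) : Nat) : Int) = length) := by push_cast; omega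
      simp only [hne, if_false]
      have hk : (length - ((walk.length : Int) + 1)).toNat
          = (length - ((walk.length : Int) + 1 + 1)).toNat + 1 := by omega
      rw [hk, Function.iterate_succ_apply, pvStep_singleton]
      have hfold : ∀ (ns : List Int) (ws : List (List Int)),
          ns.foldl (fun ws n => pvDfsA g length f n (walk ++ [vertex]) ws) ws
            = ws ++ (pvStep g)^[(length - ((walk.length : Int) + 1 + 1)).toNat]
                (ns.map (fun n => (walk ++ [vertex]) ++ [n])) := by
        intro ns
        induction ns with
        | nil => intro ws; simp [pvStep_iterate_nil]
        | cons n ns ihn =>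
          intro ws
          simp only [List.foldl_cons, List.map_cons]
          rw [ihn, ih n (walk ++ [vertex]) ws (by simp; omega) (by simp; omega)]
          have : ((((walk ++ [vertex]).length : Int) + 1)) = ((walk.length : Int) + 1 + 1) := by
            simp
          rw [this]
          rw [List.append_assoc]
          congr 1
          rw [← pvStep_iterate_append]
          rfl
      exact hfold _ _

-- ===== VERDICT =====
theorem generate_walks_with_loops_spec : Claim_equal_generate_walks_with_loops := by
  intro graph start_vertex length _ hpre
  unfold Spec_generate_walks_with_loops generate_walks_with_loops generate_walks_with_loops_alt
  by_cases h : length < 1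
  · -- both sides are []: A's port has fuel 0 and the length test (1 = length) fails
    have h0 : length.toNat = 0 := by omega
    rw [h0, pvDfsA]
    have hne : ¬ ((1 : Int) = length) := by omega
    simp [hne, h]
  · have h1 : 1 ≤ length := by omega
    rw [pvDfsA_eq graph length length.toNat start_vertex [] [] (by simp; omega) (by simp; omega)]
    simp [h]
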